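-- pv_equiv track=rewrite | github.com/Anilmaity/SoftComputing | lab15.py | sentences_are_equivalent
-- ===== SOURCE A (Python) =====
-- def sentences_are_equivalent(s1, s2, word_classes):
--     # Split into words
--     l1 = s1.split()
--     l2 = s2.split()
--     # If they have different sizes they are different
--     if len(l1) != len(l2):
--         return False
--     # Go through each pair of corresponding words
--     for w1, w2 in zip(l1, l2):
--         # If it is the same word then it is okay
--         if w1 == w2:
--             continue
--         # Go through list of word classes
--         for wcls in word_classes:
--             # If both words are in the same class it is okay
--             if w1 in wcls and w2 in wcls:
--                 # Continue to next pair of words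
--                 break
--         else:  # Again, this else goes with the for loop
--             # If no class contains the pair of words
--             return False
--     return True
-- ===== SOURCE B (Python) =====
-- def sentences_are_equivalent(s1, s2, word_classes):
--     l1 = s1.split()
--     l2 = s2.split()
--     if len(l1) != len(l2):
--         return False
--     # Precompute word -> set of indices of the classes containing it
--     idx = {}
--     for i, wcls in enumerate(word_classes):
--         for w in wcls:
--             idx.setdefault(w, set()).add(i)
--     empty = set()
--     return all(w1 == w2 or not idx.get(w1, empty).isdisjoint(idx.get(w2, empty))
--                for w1, w2 in zip(l1, l2))
-- ===== Notes on version B (the rewrite author's own statement) =====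
-- stated objective: alternative
-- what changed: B precomputes a dict mapping each word to the set of indices of the classes containing it and tests each word pair with one set-intersection (isdisjoint) query, instead of A's inner scan over every class with two list-membership tests per class; the inner class scan disappears, at the cost of building the index up front.
import Mathlib
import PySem

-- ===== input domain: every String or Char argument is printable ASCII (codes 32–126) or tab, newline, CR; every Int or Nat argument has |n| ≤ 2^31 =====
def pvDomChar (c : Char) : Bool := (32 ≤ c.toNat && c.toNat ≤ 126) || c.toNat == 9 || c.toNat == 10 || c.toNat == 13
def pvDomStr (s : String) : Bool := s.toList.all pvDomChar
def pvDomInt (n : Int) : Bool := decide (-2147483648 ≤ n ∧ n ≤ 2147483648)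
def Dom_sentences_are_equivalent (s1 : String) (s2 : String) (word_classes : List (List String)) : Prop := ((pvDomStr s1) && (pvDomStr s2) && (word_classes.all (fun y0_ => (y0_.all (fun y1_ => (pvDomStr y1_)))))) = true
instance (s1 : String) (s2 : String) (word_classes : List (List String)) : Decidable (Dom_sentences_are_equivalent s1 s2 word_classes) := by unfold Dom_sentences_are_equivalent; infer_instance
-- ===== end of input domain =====

-- B replaces A's per-pair scan over all classes by a precomputed word -> class-index-set
-- dict queried with one set-intersection test per pair (objective: alternative).

-- ===== PORT A =====
-- inner 'for wcls in word_classes: … break / else: return False' loop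
def pvInClass (w1 w2 : String) : List (List String) → Bool
  | [] => false
  | wcls :: rest =>
      if wcls.contains w1 && wcls.contains w2 then true
      else pvInClass w1 w2 rest

-- outer 'for w1, w2 in zip(l1, l2)' loop
def pvPairsLoop (wcs : List (List String)) : List (String × String) → Bool
  | [] => true
  | (w1, w2) :: rest =>
      if w1 == w2 then pvPairsLoop wcs rest
      else if pvInClass w1 w2 wcs then pvPairsLoop wcs rest
      else false

def sentences_are_equivalent (s1 : String) (s2 : String) (word_classes : List (List String)) : Bool :=
  let l1 := PySem.Str.split₀ s1
  let l2 := PySem.Str.split₀ s2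
  if l1.length ≠ l2.length then false
  else pvPairsLoop word_classes (l1.zip l2)

-- ===== PORT B =====
-- 'for i, wcls in enumerate(word_classes): for w in wcls: idx.setdefault(w, set()).add(i)'
def pvBuildIdx (wcs : List (List String)) : PySem.Dict String (PySem.Set Int) :=
  (PySem.List.enumerate wcs 0).foldl
    (fun d p => p.2.foldl (fun d w => d.modify w [] (fun s => PySem.Set.add s p.1)) d)
    PySem.Dict.empty

def sentences_are_equivalent_alt (s1 : String) (s2 : String) (word_classes : List (List String)) : Bool :=
  let l1 := PySem.Str.split₀ s1
  let l2 := PySem.Str.split₀ s2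
  if l1.length ≠ l2.length then false
  else
    let idx := pvBuildIdx word_classes
    (l1.zip l2).all (fun p =>
      p.1 == p.2 || !(PySem.Set.isdisjoint (idx.getD p.1 []) (idx.getD p.2 [])))

-- ===== PRECONDITION & SPEC =====
def Spec_sentences_are_equivalent (s1 : String) (s2 : String) (word_classes : List (List String)) (out : Bool) : Prop := out = sentences_are_equivalent_alt s1 s2 word_classes
instance (s1 : String) (s2 : String) (word_classes : List (List String)) (out : Bool) : Decidable (Spec_sentences_are_equivalent s1 s2 word_classes out) := by unfold Spec_sentences_are_equivalent; infer_instance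

-- ===== CLAIM (what is proved, stated in full; the proofs are below) =====
def Claim_equal_sentences_are_equivalent : Prop := ∀ (s1 : String) (s2 : String) (word_classes : List (List String)), Dom_sentences_are_equivalent s1 s2 word_classes → Spec_sentences_are_equivalent s1 s2 word_classes (sentences_are_equivalent s1 s2 word_classes)

-- ===== LEMMAS AND PROOFS =====

-- inner build loop over one class: what ends up in the bucket of word w
theorem pv_mem_getD_inner (ws : List String) (i : Int) (d : PySem.Dict String (PySem.Set Int))
    (w : String) (j : Int) :
    (j ∈ (ws.foldl (fun d w' => d.modify w' [] (fun s => PySem.Set.add s i)) d).getD w []) ↔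
      j ∈ d.getD w [] ∨ (w ∈ ws ∧ j = i) := by
  induction ws generalizing d with
  | nil => simp
  | cons x xs ih =>
      simp only [List.foldl_cons, ih, PySem.Dict.getD_modify, List.mem_cons]
      by_cases hx : w = x
      · subst hx; simp [PySem.Set.mem_add]; try tauto
      · simp [hx]; try tauto

-- outer build loop: j is in w's bucket iff some enumerated class (j, cls) contains w
theorem pv_mem_getD_outer (l : List (Int × List String)) (d : PySem.Dict String (PySem.Set Int))
    (w : String) (j : Int) :
    (j ∈ (l.foldl (fun d p => p.2.foldl (fun d w' => d.modify w' [] (fun s => PySem.Set.add s p.1)) d) d).getD w []) ↔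
      j ∈ d.getD w [] ∨ ∃ p ∈ l, w ∈ p.2 ∧ j = p.1 := by
  induction l generalizing d with
  | nil => simp
  | cons p ps ih =>
      simp only [List.foldl_cons, ih, pv_mem_getD_inner, List.mem_cons]
      constructor
      · rintro (⟨h | ⟨hw, hj⟩⟩ | ⟨q, hq, hwq, hjq⟩)
        · exact Or.inl h
        · exact Or.inr ⟨p, Or.inl rfl, hw, hj⟩
        · exact Or.inr ⟨q, Or.inr hq, hwq, hjq⟩
      · rintro (h | ⟨q, (rfl | hq), hwq, hjq⟩)
        · exact Or.inl (Or.inl h)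
        · exact Or.inl (Or.inr ⟨hwq, hjq⟩)
        · exact Or.inr ⟨q, hq, hwq, hjq⟩

theorem pv_mem_buildIdx (wcs : List (List String)) (w : String) (j : Int) :
    (j ∈ (pvBuildIdx wcs).getD w []) ↔ ∃ k : Nat, ∃ h : k < wcs.length, w ∈ wcs[k] ∧ j = (k : Int) := by
  unfold pvBuildIdx
  rw [pv_mem_getD_outer]
  simp only [PySem.Dict.empty, PySem.Dict.getD, PySem.Dict.get?]
  constructor
  · rintro (h | ⟨p, hp, hwp, hjp⟩)
    · simp at h
    · rcases (PySem.List.mem_enumerate_iff _ _ _).mp hp with ⟨k, hk, rfl⟩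
      exact ⟨k, hk, by simpa using hwp, by simpa using hjp⟩
  · rintro ⟨k, hk, hw, rfl⟩
    exact Or.inr ⟨((0 : Int) + (k : Int), wcs[k]), (PySem.List.mem_enumerate_iff _ _ _).mpr ⟨k, hk, rfl⟩, hw, by simp⟩

-- per-pair test equality: A's class scan = B's set-intersection test
theorem pv_inClass_eq (w1 w2 : String) (wcs : List (List String)) :
    pvInClass w1 w2 wcs =
      !(PySem.Set.isdisjoint ((pvBuildIdx wcs).getD w1 []) ((pvBuildIdx wcs).getD w2 [])) := by
  have hany : pvInClass w1 w2 wcs = wcs.any (fun c => c.contains w1 && c.contains w2) := by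
    induction wcs with
    | nil => rfl
    | cons c cs ih =>
        unfold pvInClass
        rw [List.any_cons]
        simp [ih]
  have hA : pvInClass w1 w2 wcs = true ↔ ∃ k : Nat, ∃ h : k < wcs.length, w1 ∈ wcs[k] ∧ w2 ∈ wcs[k] := by
    rw [hany]
    simp only [List.any_eq_true, Bool.and_eq_true]
    constructor
    · rintro ⟨c, hc, ha, hb⟩
      rcases List.mem_iff_getElem.mp hc with ⟨k, hk, rfl⟩
      exact ⟨k, hk, by simpa using ha, by simpa using hb⟩
    · rintro ⟨k, hk, ha, hb⟩
      exact ⟨wcs[k], List.getElem_mem hk, by simpa using ha, by simpa using hb⟩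
  have hB : (!(PySem.Set.isdisjoint ((pvBuildIdx wcs).getD w1 []) ((pvBuildIdx wcs).getD w2 []))) = true ↔
      ∃ k : Nat, ∃ h : k < wcs.length, w1 ∈ wcs[k] ∧ w2 ∈ wcs[k] := by
    rw [Bool.not_eq_eq_eq_not, Bool.not_true, ← Bool.not_eq_true, PySem.Set.isdisjoint_iff]
    push_neg
    constructor
    · rintro ⟨j, hj1, hj2⟩
      rcases (pv_mem_buildIdx wcs w1 j).mp hj1 with ⟨k, hk, hw1, rfl⟩
      rcases (pv_mem_buildIdx wcs w2 _).mp hj2 with ⟨k2, hk2, hw2, hkk⟩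
      have ek : k2 = k := by exact_mod_cast hkk.symm
      subst ek
      exact ⟨k2, hk2, hw1, hw2⟩
    · rintro ⟨k, hk, hw1, hw2⟩
      exact ⟨(k : Int), (pv_mem_buildIdx wcs w1 _).mpr ⟨k, hk, hw1, rfl⟩,
        (pv_mem_buildIdx wcs w2 _).mpr ⟨k, hk, hw2, rfl⟩⟩
  rw [Bool.eq_iff_iff, hA, hB]

theorem pv_loop_eq_all (wcs : List (List String)) (pairs : List (String × String)) :
    pvPairsLoop wcs pairs =
      pairs.all (fun p =>
        p.1 == p.2 || !(PySem.Set.isdisjoint (((pvBuildIdx wcs)).getD p.1 []) (((pvBuildIdx wcs)).getD p.2 []))) := by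
  induction pairs with
  | nil => rfl
  | cons p ps ih =>
      obtain ⟨w1, w2⟩ := p
      rw [List.all_cons]
      have ht : ((w1, w2).1 == (w1, w2).2 || !(PySem.Set.isdisjoint ((pvBuildIdx wcs).getD (w1, w2).1 []) ((pvBuildIdx wcs).getD (w1, w2).2 []))) = (w1 == w2 || pvInClass w1 w2 wcs) := by
        rw [pv_inClass_eq]
      rw [ht]
      unfold pvPairsLoop
      by_cases h12 : (w1 == w2) = true
      · simp [h12, ih]
      · by_cases hc : pvInClass w1 w2 wcs = true
        · simp [h12, hc, ih]
        · simp only [Bool.not_eq_true] at h12 hc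
          simp [h12, hc]

-- ===== VERDICT (by name: the statement is the Claim_ definition above) =====
theorem sentences_are_equivalent_spec : Claim_equal_sentences_are_equivalent := by
  intro s1 s2 wcs _
  unfold Spec_sentences_are_equivalent sentences_are_equivalent sentences_are_equivalent_alt
  by_cases h : (PySem.Str.split₀ s1).length ≠ (PySem.Str.split₀ s2).length
  · simp [h]
  · simp [h, pv_loop_eq_all]
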